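-- pv_equiv track=rewrite | github.com/Kyaruk/Abnormal-Detection-Based-GAN | data/PreProcess.py | attr2num
-- ===== SOURCE A (Python) =====
-- def attr2num(data):
--     temp_data = []
--     temp_col = {}
--     temp_index = 0
--     for x_train_col in data:
--         temp_temp_data = []
--         for col in x_train_col:
--             if col not in temp_col:
--                 temp_col[col] = temp_index
--                 temp_index += 1
--             if col in temp_col:
--                 temp_temp_data.append(temp_col[col])
--         temp_data.append(temp_temp_data)
--     return temp_data, temp_index, temp_col
-- ===== SOURCE B (Python) =====
-- def attr2num(data):
--     # Pass 1: learn the encoding (first-appearance order).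
--     temp_col = {}
--     for row in data:
--         for col in row:
--             if col not in temp_col:
--                 temp_col[col] = len(temp_col)
--     # Pass 2: apply the completed mapping.
--     temp_data = [[temp_col[c] for c in row] for row in data]
--     return temp_data, len(temp_col), temp_col
-- ===== Notes on version B (the rewrite author's own statement) =====
-- stated objective: simpler
-- what changed: A interleaves learning and applying the encoding in one nested loop with a separate counter; B first learns the value-to-index map in one pass, then applies the finished map with a nested comprehension, and returns len(map) instead of maintaining a counter.
import Mathlib
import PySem

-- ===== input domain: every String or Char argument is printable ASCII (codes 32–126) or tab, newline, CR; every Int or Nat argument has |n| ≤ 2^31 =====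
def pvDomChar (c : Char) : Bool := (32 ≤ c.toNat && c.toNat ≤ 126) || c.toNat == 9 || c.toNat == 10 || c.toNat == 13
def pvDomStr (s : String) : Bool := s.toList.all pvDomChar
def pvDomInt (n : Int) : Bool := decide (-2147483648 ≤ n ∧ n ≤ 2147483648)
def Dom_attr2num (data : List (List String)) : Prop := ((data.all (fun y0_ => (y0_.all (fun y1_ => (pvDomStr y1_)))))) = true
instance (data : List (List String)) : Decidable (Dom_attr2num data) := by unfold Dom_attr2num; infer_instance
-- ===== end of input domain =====

-- B splits A's single interleaved loop into 'learn the encoding' then 'apply it' (simpler decomposition, same cost).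

-- ===== PORT A =====
-- inner-loop body: possible insert (first if), then guarded append (second if);
-- d2.getD col 0 ports temp_col[col] (the guard ensures the key is present).
def pvStepA (st : List Int × PySem.Dict String Int × Int) (col : String) :
    List Int × PySem.Dict String Int × Int :=
  let d2 := if st.2.1.contains col then st.2.1 else st.2.1.insert col st.2.2
  let i2 := if st.2.1.contains col then st.2.2 else st.2.2 + 1
  if d2.contains col then (st.1 ++ [d2.getD col 0], d2, i2) else (st.1, d2, i2)

-- outer-loop body: run the inner loop, append its row, keep dict and counter
def pvOuterStep (st : List (List Int) × PySem.Dict String Int × Int) (row : List String) :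
    List (List Int) × PySem.Dict String Int × Int :=
  let inner := row.foldl pvStepA ([], st.2.1, st.2.2)
  (st.1 ++ [inner.1], inner.2.1, inner.2.2)

def attr2num (data : List (List String)) : List (List Int) × Int × (List (String × Int)) :=
  let st := data.foldl pvOuterStep ([], PySem.Dict.empty, 0)
  (st.1, st.2.2, st.2.1.items)

-- ===== PORT B =====
def pvLearnRow (d : PySem.Dict String Int) (row : List String) : PySem.Dict String Int :=
  row.foldl (fun d col => if d.contains col then d else d.insert col (d.size : Int)) d

def attr2num_alt (data : List (List String)) : List (List Int) × Int × (List (String × Int)) :=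
  let d := data.foldl pvLearnRow PySem.Dict.empty
  (data.map (fun row => row.map (fun c => d.getD c 0)), (d.size : Int), d.items)

-- ===== PRECONDITION & SPEC =====
def Spec_attr2num (data : List (List String)) (out : List (List Int) × Int × (List (String × Int))) : Prop := out = attr2num_alt data
instance (data : List (List String)) (out : List (List Int) × Int × (List (String × Int))) : Decidable (Spec_attr2num data out) := by unfold Spec_attr2num; infer_instance

-- ===== CLAIM (what is proved, stated in full; the proofs are below) =====
def Claim_equal_attr2num : Prop := ∀ (data : List (List String)), Dom_attr2num data → Spec_attr2num data (attr2num data)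

-- ===== LEMMAS AND PROOFS =====

-- established lookups survive one learning step
lemma pv_mono_step (d : PySem.Dict String Int) (col : String) (k : String) (v : Int)
    (h : d.get? k = some v) :
    (if d.contains col then d else d.insert col (d.size : Int)).get? k = some v := by
  split_ifs with hc
  · exact h
  · rcases eq_or_ne k col with rfl | hne
    · rw [(PySem.Dict.get?_eq_none_iff_contains d k).mpr (by simpa using hc)] at h; cases h
    · rw [PySem.Dict.get?_insert_of_ne d _ hne]; exact h

lemma pv_mono_row (row : List String) (d : PySem.Dict String Int) (k : String) (v : Int)
    (h : d.get? k = some v) : (pvLearnRow d row).get? k = some v := by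
  induction row generalizing d with
  | nil => exact h
  | cons col rest ih =>
    exact ih _ (pv_mono_step d col k v h)

lemma pv_mono_build (data : List (List String)) (d : PySem.Dict String Int) (k : String) (v : Int)
    (h : d.get? k = some v) : (data.foldl pvLearnRow d).get? k = some v := by
  induction data generalizing d with
  | nil => exact h
  | cons row rest ih => exact ih _ (pv_mono_row row d k v h)

-- A's inner loop, started with counter = size, appends exactly the final lookups
lemma pv_inner (row : List String) (tt : List Int) (d D : PySem.Dict String Int)
    (hD : ∀ k v, (pvLearnRow d row).get? k = some v → D.get? k = some v) :
    row.foldl pvStepA (tt, d, (d.size : Int)) =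
      (tt ++ row.map (fun c => D.getD c 0), pvLearnRow d row, ((pvLearnRow d row).size : Int)) := by
  induction row generalizing tt d with
  | nil => simp [pvLearnRow]
  | cons col rest ih =>
    rw [List.foldl_cons]
    by_cases hc : d.contains col = true
    · obtain ⟨v, hv⟩ : ∃ v, d.get? col = some v := by
        rw [PySem.Dict.contains_eq_isSome_get?] at hc
        exact Option.isSome_iff_exists.mp hc
      have hstepd : pvStepA (tt, d, (d.size : Int)) col
          = (tt ++ [d.getD col 0], d, (d.size : Int)) := by
        simp [pvStepA, hc]
      have hlr : pvLearnRow d (col :: rest) = pvLearnRow d rest := by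
        simp [pvLearnRow, hc]
      have hDcol : D.getD col 0 = d.getD col 0 := by
        rw [PySem.Dict.getD_of_get?_eq_some _ _ hv,
          PySem.Dict.getD_of_get?_eq_some _ _ (hD col v (by rw [hlr]; exact pv_mono_row rest d col v hv))]
      rw [hstepd, hlr, ih (tt ++ [d.getD col 0]) d (by rw [hlr] at hD; exact hD)]
      simp [hDcol]
    · have hc' : d.contains col = false := by simpa using hc
      have hstepd : pvStepA (tt, d, (d.size : Int)) col
          = (tt ++ [(d.size : Int)], d.insert col (d.size : Int), (d.size : Int) + 1) := by
        simp [pvStepA, hc', PySem.Dict.contains_insert_self, PySem.Dict.getD_insert_self]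
      have hlr : pvLearnRow d (col :: rest) = pvLearnRow (d.insert col (d.size : Int)) rest := by
        simp [pvLearnRow, hc']
      have hsz : (((d.insert col (d.size : Int)).size : Int)) = (d.size : Int) + 1 := by
        rw [PySem.Dict.size_insert]; simp [hc']
      have hDcol : D.getD col 0 = (d.size : Int) := by
        refine PySem.Dict.getD_of_get?_eq_some _ _ (hD col _ ?_)
        rw [hlr]
        exact pv_mono_row rest _ col _ (PySem.Dict.get?_insert_self d col _)
      rw [hstepd, hlr, ← hsz,
        ih (tt ++ [(d.size : Int)]) (d.insert col (d.size : Int)) (by rw [hlr] at hD; exact hD)]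
      simp [hDcol]

-- A's outer loop, started with counter = size, appends the fully-encoded rows
lemma pv_outer (rows : List (List String)) (out : List (List Int)) (d D : PySem.Dict String Int)
    (hD : ∀ k v, (rows.foldl pvLearnRow d).get? k = some v → D.get? k = some v) :
    rows.foldl pvOuterStep (out, d, (d.size : Int)) =
    (out ++ rows.map (fun row => row.map (fun c => D.getD c 0)),
      rows.foldl pvLearnRow d, (((rows.foldl pvLearnRow d).size : Int))) := by
  induction rows generalizing out d with
  | nil => simp
  | cons row rest ih =>
    rw [List.foldl_cons]
    have hD' : ∀ k v, (pvLearnRow d row).get? k = some v → D.get? k = some v := by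
      intro k v hv
      exact hD k v (pv_mono_build rest _ k v hv)
    have hstep : pvOuterStep (out, d, (d.size : Int)) row
        = (out ++ [row.map (fun c => D.getD c 0)], pvLearnRow d row,
            ((pvLearnRow d row).size : Int)) := by
      simp [pvOuterStep, pv_inner row [] d D hD']
    rw [hstep, ih (out ++ [row.map (fun c => D.getD c 0)]) (pvLearnRow d row)
      (by simpa using hD)]
    simp

-- ===== VERDICT (by name: the statement is the Claim_ definition above) =====
theorem attr2num_spec : Claim_equal_attr2num := by
  intro data _
  unfold Spec_attr2num attr2num attr2num_alt
  have h0 : ((PySem.Dict.empty : PySem.Dict String Int).size : Int) = 0 := by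
    simp [PySem.Dict.size_empty]
  rw [← h0, pv_outer data [] PySem.Dict.empty (data.foldl pvLearnRow PySem.Dict.empty)
    (fun _ _ h => h)]
  simp
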